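-- pv_equiv track=rewrite | github.com/0melette/leetcoder | problems/easy/getLucky.py | getLucky
-- ===== SOURCE A (Python) =====
-- def getLucky(s: str, k: int) -> int:
--     number = ""
--     for x in s:
--         number += str(ord(x) - ord('a') + 1)
--
--     for _ in range(k):
--         answer = 0
--         for x in number:
--             answer += int(x)
--         number = str(answer)
--
--     return int(number)
-- ===== SOURCE B (Python) =====
-- def _rounds(number, k):
--     # apply k digit-sum rounds to the decimal string `number`;
--     # a single digit is a fixpoint of the round, so stop early there
--     if k <= 0 or len(number) == 1:
--         return number
--     return _rounds(str(sum(int(d) for d in number)), k - 1)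
--
--
-- def getLucky(s: str, k: int) -> int:
--     if k <= 0:
--         return int("".join(str(ord(c) - 96) for c in s))
--     # digit sum of the concatenated encoding, computed per letter:
--     # each position value v contributes v // 10 + v % 10
--     first = sum((ord(c) - 96) // 10 + (ord(c) - 96) % 10 for c in s)
--     return int(_rounds(str(first), k - 1))
-- ===== Notes on version B (the rewrite author's own statement) =====
-- stated objective: faster
-- what changed: For k>=1 B never builds or re-scans the concatenated encoding: it gets the first round's value in closed form from the identity digit-sum(concatenation) = sum of per-letter digit sums (v//10 + v%10 per letter), runs the remaining rounds by recursion on k, and stops early once the value is a single digit (a fixpoint of the round); only k<=0 returns the joined encoding.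
import Mathlib
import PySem

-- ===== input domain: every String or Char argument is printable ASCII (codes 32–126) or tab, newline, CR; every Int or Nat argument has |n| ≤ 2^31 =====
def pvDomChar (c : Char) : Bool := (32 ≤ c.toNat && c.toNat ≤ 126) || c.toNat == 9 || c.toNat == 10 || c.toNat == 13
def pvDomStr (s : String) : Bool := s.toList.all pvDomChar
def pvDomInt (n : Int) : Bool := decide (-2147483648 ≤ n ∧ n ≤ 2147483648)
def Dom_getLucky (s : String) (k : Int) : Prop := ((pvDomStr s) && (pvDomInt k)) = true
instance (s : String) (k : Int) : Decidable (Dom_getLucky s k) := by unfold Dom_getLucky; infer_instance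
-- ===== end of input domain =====

-- B replaces the concatenate-then-digit-sum first round by its closed form (digit sum of the
-- concatenation = sum of per-letter digit sums), runs the remaining rounds by recursion on k with
-- an early exit at the single-digit fixpoint, and only builds the joined encoding for k <= 0
-- (objective: faster, measured).

-- ===== PORT A =====
-- number = ""; for x in s: number += str(ord(x) - ord('a') + 1)
-- for _ in range(k): answer = 0; for x in number: answer += int(x); number = str(answer)
-- return int(number)   (int(c) / int(number) are ofChars?, total via .getD 0; Pre_ excludes the raising inputs)
def getLucky (s : String) (k : Int) : Int :=
  let number : List Char :=
    s.toList.foldl (fun number x => number ++ PySem.Int.toChars ((x.toNat : Int) - 97 + 1)) []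
  let number : List Char :=
    (PySem.List.pyRange 0 k 1).foldl
      (fun number _ =>
        let answer : Int := number.foldl (fun answer x => answer + (PySem.Int.ofChars? [x]).getD 0) 0
        PySem.Int.toChars answer)
      number
  (PySem.Int.ofChars? number).getD 0

-- ===== PORT B =====
-- def _rounds(number, k): if k <= 0 or len(number) == 1: return number
--                         return _rounds(str(sum(int(d) for d in number)), k - 1)
def pvRoundsB (number : List Char) (k : Int) : List Char :=
  if k ≤ 0 ∨ number.length = 1 then number
  else pvRoundsB
    (PySem.Int.toChars ((number.map (fun d => (PySem.Int.ofChars? [d]).getD 0)).sum)) (k - 1)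
termination_by k.toNat
decreasing_by omega

-- if k <= 0: return int("".join(str(ord(c) - 96) for c in s))
-- first = sum((ord(c) - 96) // 10 + (ord(c) - 96) % 10 for c in s)
-- return int(_rounds(str(first), k - 1))
def getLucky_alt (s : String) (k : Int) : Int :=
  if k ≤ 0 then
    (PySem.Int.ofChars?
      (PySem.Chars.join [] (s.toList.map (fun c => PySem.Int.toChars ((c.toNat : Int) - 96))))).getD 0
  else
    let first : Int :=
      (s.toList.map (fun c =>
        PySem.Int.floordiv ((c.toNat : Int) - 96) 10 + PySem.Int.mod ((c.toNat : Int) - 96) 10)).sum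
    (PySem.Int.ofChars? (pvRoundsB (PySem.Int.toChars first) (k - 1))).getD 0

-- ===== PRECONDITION & SPEC =====
-- Exactly the inputs on which the Python A returns: for k ≥ 1 every character must encode to a
-- nonnegative value (ord ≥ 96), else int(x) hits a '-' (ValueError); for k ≤ 0 the string must be
-- nonempty and every character after the first must have ord ≥ 96, else int(number) raises ValueError.
def Pre_getLucky (s : String) (k : Int) : Prop :=
  (1 ≤ k → s.toList.all (fun c => 96 ≤ c.toNat) = true) ∧
  (k < 1 → s.toList ≠ [] ∧ s.toList.tail.all (fun c => 96 ≤ c.toNat) = true)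
instance (s : String) (k : Int) : Decidable (Pre_getLucky s k) := by unfold Pre_getLucky; infer_instance

def pvWitness_getLucky : String × Int := ("ab", 2)

def Spec_getLucky (s : String) (k : Int) (out : Int) : Prop := out = getLucky_alt s k
instance (s : String) (k : Int) (out : Int) : Decidable (Spec_getLucky s k out) := by unfold Spec_getLucky; infer_instance

-- ===== CLAIM (what is proved, stated in full; the proofs are below) =====
def Claim_equal_getLucky : Prop := ∀ (s : String) (k : Int), Dom_getLucky s k → Pre_getLucky s k → Spec_getLucky s k (getLucky s k)

-- ===== LEMMAS AND PROOFS =====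

-- the round function both programs apply: string ↦ str(digit sum)
def pvRound (num : List Char) : List Char :=
  PySem.Int.toChars ((num.map (fun d => (PySem.Int.ofChars? [d]).getD 0)).sum)

-- A's inner accumulator loop is the mapped sum
lemma pv_foldl_dsum (num : List Char) :
    num.foldl (fun answer x => answer + (PySem.Int.ofChars? [x]).getD 0) 0
      = (num.map (fun d => (PySem.Int.ofChars? [d]).getD 0)).sum := by
  rw [PySem.List.foldl_add]; ring

-- a foldl whose body ignores the elements is an iterate of its body
lemma pv_foldl_const_iterate (l : List Int) (num : List Char) :
    l.foldl (fun n _ => pvRound n) num = pvRound^[l.length] num := by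
  induction l generalizing num with
  | nil => rfl
  | cons a l ih => simp [List.foldl_cons, ih, Function.iterate_succ_apply]

-- the ten decimal digit characters
def pvDigits : List Char := ['0', '1', '2', '3', '4', '5', '6', '7', '8', '9']

lemma pv_digitChar_mem (m : Nat) (h : m < 10) : Nat.digitChar m ∈ pvDigits := by
  interval_cases m <;> decide

lemma pv_toDigitsCore_mem (f n : Nat) (acc : List Char) (hacc : ∀ c ∈ acc, c ∈ pvDigits) :
    ∀ c ∈ Nat.toDigitsCore 10 f n acc, c ∈ pvDigits := by
  induction f generalizing n acc with
  | zero => simpa [Nat.toDigitsCore] using hacc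
  | succ f ih =>
    simp only [Nat.toDigitsCore]
    split
    · intro c hc
      rcases List.mem_cons.mp hc with h | h
      · exact h ▸ pv_digitChar_mem _ (Nat.mod_lt _ (by omega))
      · exact hacc _ h
    · refine ih _ _ ?_
      intro c hc
      rcases List.mem_cons.mp hc with h | h
      · exact h ▸ pv_digitChar_mem _ (Nat.mod_lt _ (by omega))
      · exact hacc _ h

lemma pv_toChars_mem {v : Int} (hv : 0 ≤ v) : ∀ c ∈ PySem.Int.toChars v, c ∈ pvDigits := by
  have : ¬ v < 0 := by omega
  simp only [PySem.Int.toChars, this, if_false]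
  exact pv_toDigitsCore_mem _ _ _ (by simp)

lemma pv_digit_val_nonneg {c : Char} (hc : c ∈ pvDigits) :
    0 ≤ (PySem.Int.ofChars? [c]).getD 0 := by
  fin_cases hc <;> decide

-- the digit sum of str(n) is nonnegative for n ≥ 0
lemma pv_round_sum_nonneg (n : Int) (hn : 0 ≤ n) :
    0 ≤ ((PySem.Int.toChars n).map (fun d => (PySem.Int.ofChars? [d]).getD 0)).sum := by
  refine List.sum_nonneg ?_
  intro x hx
  rcases List.mem_map.mp hx with ⟨d, hd, rfl⟩
  exact pv_digit_val_nonneg (pv_toChars_mem hn d hd)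

lemma pv_toDigitsCore_len (f : Nat) : ∀ (n : Nat) (acc : List Char), n < f →
    acc.length + 1 ≤ (Nat.toDigitsCore 10 f n acc).length := by
  induction f with
  | zero => intro n acc h; omega
  | succ f ih =>
    intro n acc h
    simp only [Nat.toDigitsCore]
    split
    · simp
    · rename_i hne
      have h10 : 10 ≤ n := by
        rcases Nat.lt_or_ge n 10 with h' | h'
        · exact absurd (Nat.div_eq_of_lt h') hne
        · exact h'
      have := ih (n / 10) (Nat.digitChar (n % 10) :: acc) (by omega)
      simp only [List.length_cons] at this
      omega

-- a one-character str(n) with n ≥ 0 forces n < 10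
lemma pv_toChars_len_one {n : Int} (h : (PySem.Int.toChars n).length = 1) :
    n < 10 := by
  by_contra h10
  have hlt : ¬ n < 0 := by omega
  rw [PySem.Int.toChars, if_neg hlt] at h
  have hnn : 10 ≤ n.toNat := by omega
  unfold Nat.toDigits at h
  rw [Nat.toDigitsCore] at h
  have hne : n.toNat / 10 ≠ 0 := by omega
  rw [if_neg hne] at h
  have := pv_toDigitsCore_len n.toNat (n.toNat / 10) [Nat.digitChar (n.toNat % 10)] (by omega)
  simp only [List.length_cons, List.length_nil] at this
  omega

-- a single digit is a fixpoint of the round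
lemma pv_round_fix {n : Int} (h0 : 0 ≤ n) (h9 : n < 10) :
    pvRound (PySem.Int.toChars n) = PySem.Int.toChars n := by
  interval_cases n <;> decide

-- B's recursion is the same iterate (the early exit stops at a fixpoint of pvRound)
lemma pv_roundsB_iterate_nat (m : Nat) : ∀ (n : Int), 0 ≤ n →
    pvRoundsB (PySem.Int.toChars n) (m : Int) = pvRound^[m] (PySem.Int.toChars n) := by
  induction m with
  | zero => intro n _; rw [pvRoundsB]; simp
  | succ m ih =>
    intro n hn
    rw [pvRoundsB]
    by_cases hl : (PySem.Int.toChars n).length = 1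
    · rw [if_pos (Or.inr hl)]
      exact (Function.iterate_fixed (pv_round_fix hn (pv_toChars_len_one hl)) (m + 1)).symm
    · have hcond : ¬ ((m : Int) + 1 ≤ 0 ∨ (PySem.Int.toChars n).length = 1) := by
        exact fun h => h.elim (by omega) hl
      have h2 : ((m : Int) + 1) - 1 = (m : Int) := by omega
      rw [Nat.cast_succ, if_neg hcond, h2,
        ih _ (pv_round_sum_nonneg n hn), ← pvRound, Function.iterate_succ_apply]

lemma pv_roundsB_iterate (j : Int) (h : 0 ≤ j) (n : Int) (hn : 0 ≤ n) :
    pvRoundsB (PySem.Int.toChars n) j = pvRound^[j.toNat] (PySem.Int.toChars n) := by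
  have := pv_roundsB_iterate_nat j.toNat n hn
  rwa [Int.toNat_of_nonneg h] at this

lemma pv_sum_flatMap (l : List Char) (g : Char → List Int) :
    (l.flatMap g).sum = (l.map (fun c => (g c).sum)).sum := by
  induction l with
  | nil => rfl
  | cons a l ih => simp [List.flatMap_cons, ih]

-- the encoding loop is a flatMap of per-letter encodings
lemma pv_init_flatMap (s : String) :
    s.toList.foldl (fun number x => number ++ PySem.Int.toChars ((x.toNat : Int) - 97 + 1)) []
      = s.toList.flatMap (fun c => PySem.Int.toChars ((c.toNat : Int) - 96)) := by
  rw [PySem.List.foldl_append_eq_flatMap]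
  simp only [List.nil_append]
  refine List.flatMap_congr (fun x _ => ?_)
  congr 1
  ring

lemma pv_join_nil (ps : List (List Char)) : PySem.Chars.join [] ps = ps.flatten := by
  induction ps with
  | nil => rfl
  | cons p ps ih =>
    cases ps with
    | nil => simp [PySem.Chars.join_singleton]
    | cons q qs => rw [PySem.Chars.join_cons_cons]; simp_all

-- per-letter digit sum of str(v) in closed form, for the values a Dom character can encode to
lemma pv_letter_dsum (v : Int) (h0 : 0 ≤ v) (h1 : v ≤ 30) :
    ((PySem.Int.toChars v).map (fun d => (PySem.Int.ofChars? [d]).getD 0)).sum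
      = PySem.Int.floordiv v 10 + PySem.Int.mod v 10 := by
  interval_cases v <;> decide

lemma pv_dom_le (s : String) (k : Int) (hdom : Dom_getLucky s k) :
    ∀ c ∈ s.toList, c.toNat ≤ 126 := by
  intro c hc
  unfold Dom_getLucky pvDomStr at hdom
  rw [Bool.and_eq_true, List.all_eq_true] at hdom
  have := hdom.1 c hc
  unfold pvDomChar at this
  simp only [Bool.or_eq_true, Bool.and_eq_true, decide_eq_true_eq, beq_iff_eq] at this
  omega

-- each letter's closed-form contribution is nonnegative
lemma pv_letter_term_nonneg (v : Int) (h0 : 0 ≤ v) (h1 : v ≤ 30) :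
    0 ≤ PySem.Int.floordiv v 10 + PySem.Int.mod v 10 := by
  interval_cases v <;> decide

-- the fused first round: digit sum of the concatenated encoding = B's closed-form sum
lemma pv_first_round (s : String)
    (hall : ∀ c ∈ s.toList, 96 ≤ c.toNat) (hle : ∀ c ∈ s.toList, c.toNat ≤ 126) :
    pvRound (s.toList.flatMap (fun c => PySem.Int.toChars ((c.toNat : Int) - 96)))
      = PySem.Int.toChars
          ((s.toList.map (fun c =>
            PySem.Int.floordiv ((c.toNat : Int) - 96) 10 + PySem.Int.mod ((c.toNat : Int) - 96) 10)).sum) := by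
  unfold pvRound
  congr 1
  rw [List.map_flatMap, pv_sum_flatMap]
  refine congrArg List.sum ?_
  refine List.map_congr_left (fun c hc => ?_)
  exact pv_letter_dsum _ (by have := hall c hc; omega) (by have := hle c hc; omega)

-- ===== VERDICT (by name: the statement is the Claim_ definition above) =====
theorem getLucky_spec : Claim_equal_getLucky := by
  intro s k hdom hpre
  unfold Spec_getLucky
  simp only [getLucky, getLucky_alt]
  by_cases hk : k ≤ 0
  · rw [if_pos hk, PySem.List.pyRange_one_eq_nil hk, List.foldl_nil, pv_init_flatMap,
      pv_join_nil, List.flatMap_def]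
  · rw [if_neg hk]
    have hall : ∀ c ∈ s.toList, 96 ≤ c.toNat := by
      have := hpre.1 (by omega)
      rw [List.all_eq_true] at this
      intro c hc; simpa using this c hc
    have hiter :
        (fun (number : List Char) (_ : Int) =>
          PySem.Int.toChars (number.foldl (fun answer x => answer + (PySem.Int.ofChars? [x]).getD 0) 0))
        = fun number _ => pvRound number := by
      funext number i
      rw [pv_foldl_dsum]; rfl
    rw [pv_init_flatMap, hiter, pv_foldl_const_iterate, PySem.List.length_pyRange_one]
    have hm : (k - 0).toNat = (k - 1).toNat + 1 := by omega
    have hle := pv_dom_le s k hdom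
    have hfirst : 0 ≤ (s.toList.map (fun c =>
        PySem.Int.floordiv ((c.toNat : Int) - 96) 10 + PySem.Int.mod ((c.toNat : Int) - 96) 10)).sum := by
      refine List.sum_nonneg ?_
      intro x hx
      rcases List.mem_map.mp hx with ⟨c, hc, rfl⟩
      exact pv_letter_term_nonneg _ (by have := hall c hc; omega) (by have := hle c hc; omega)
    rw [hm, Function.iterate_succ_apply, pv_first_round s hall hle,
      pv_roundsB_iterate (k - 1) (by omega) _ hfirst]
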